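-- pv_equiv track=rewrite | github.com/eyoojin/algo | 최빈값구하기/sol.py | solution
-- ===== SOURCE A (Python) =====
-- def solution(array):
--     answer = []
--     result = []
--
--     for i in array:
--         answer.append(array.count(i))
--     for j in array:
--         if array.count(j) == max(answer):
--             result.append(j)
--     if len(set(result)) == 1:
--         return result[0]
--     else:
--         return -1
-- ===== SOURCE B (Python) =====
-- def solution(array):
--     # Count each value once with a dict (one pass), then scan the distinct
--     # (value, count) pairs tracking the best count, its first value, and ties.
--     counts = {}
--     for x in array:
--         counts[x] = counts.get(x, 0) + 1
--     best_cnt = 0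
--     best_val = -1
--     ties = 0
--     for v, c in counts.items():
--         if best_cnt < c:
--             best_cnt, best_val, ties = c, v, 1
--         elif c == best_cnt:
--             ties += 1
--     return best_val if ties == 1 else -1
-- ===== Notes on version B (the rewrite author's own statement) =====
-- stated objective: faster
-- what changed: Replaces A's repeated array.count scans (two quadratic passes plus a final set/filter pass) by one counting pass building a dict and one scan over the distinct (value,count) pairs tracking best count, its first value and the number of ties.
import Mathlib
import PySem

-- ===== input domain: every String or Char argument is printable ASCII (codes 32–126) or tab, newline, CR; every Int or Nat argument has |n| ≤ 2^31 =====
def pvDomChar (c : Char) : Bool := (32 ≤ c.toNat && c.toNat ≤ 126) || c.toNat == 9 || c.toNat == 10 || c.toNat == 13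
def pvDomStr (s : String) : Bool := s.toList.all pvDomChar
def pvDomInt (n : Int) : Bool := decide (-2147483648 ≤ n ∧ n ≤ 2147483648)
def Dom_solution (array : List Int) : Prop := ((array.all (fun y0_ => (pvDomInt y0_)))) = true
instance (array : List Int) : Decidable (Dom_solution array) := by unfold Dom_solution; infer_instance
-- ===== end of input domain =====

-- B replaces A's repeated array.count scans (two quadratic passes) by one counting
-- pass building a dict plus one scan over the distinct (value, count) pairs.

-- ===== PORT A =====
-- 'max(answer)' is only evaluated inside the loop over 'array'; when that loop runs,
-- 'array' (hence 'answer') is nonempty, so the '.getD 0' default is unreachable.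
-- Likewise 'result[0]' is only read when len(set(result)) == 1, so result ≠ [] and
-- the pyGetD default is unreachable.
def solution (array : List Int) : Int :=
  let answer : List Int := array.foldl (fun acc i => acc ++ [((array.count i : Int))]) []
  let result : List Int := array.foldl (fun acc j =>
      if ((array.count j : Int) == (PySem.List.max? answer (fun y => y)).getD 0) then acc ++ [j]
      else acc) []
  if ((PySem.Set.ofList result).length == 1) then PySem.List.pyGetD result 0 (-1)
  else -1

-- ===== PORT B =====
def solution_alt (array : List Int) : Int :=
  let counts : PySem.Dict Int Int :=
    array.foldl (fun d x => d.insert x (d.getD x 0 + 1)) PySem.Dict.empty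
  let fin : Int × Int × Int :=
    counts.items.foldl (fun st p =>
      if st.1 < p.2 then (p.2, p.1, 1)
      else if p.2 == st.1 then (st.1, st.2.1, st.2.2 + 1)
      else st) (0, -1, 0)
  if fin.2.2 == 1 then fin.2.1 else -1

-- ===== PRECONDITION & SPEC =====
def Spec_solution (array : List Int) (out : Int) : Prop := out = solution_alt array
instance (array : List Int) (out : Int) : Decidable (Spec_solution array out) := by unfold Spec_solution; infer_instance

-- ===== CLAIM (what is proved, stated in full; the proofs are below) =====
def Claim_equal_solution : Prop := ∀ (array : List Int), Dom_solution array → Spec_solution array (solution array)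

-- ===== LEMMAS AND PROOFS =====

-- B's scan step over the (value, count) pairs.
def pvStep (st : Int × Int × Int) (p : Int × Int) : Int × Int × Int :=
  if st.1 < p.2 then (p.2, p.1, 1)
  else if p.2 == st.1 then (st.1, st.2.1, st.2.2 + 1)
  else st

-- running maximum of the counts, seeded with bc
def pvFmax (ps : List (Int × Int)) (bc : Int) : Int :=
  ps.foldl (fun a p => max a p.2) bc

lemma pvFmax_cons (p : Int × Int) (ps : List (Int × Int)) (bc : Int) :
    pvFmax (p :: ps) bc = pvFmax ps (max bc p.2) := rfl

lemma le_pvFmax (ps : List (Int × Int)) (bc : Int) : bc ≤ pvFmax ps bc := by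
  induction ps generalizing bc with
  | nil => simp [pvFmax]
  | cons p ps ih => rw [pvFmax_cons]; exact le_trans (le_max_left _ _) (ih _)

lemma snd_le_pvFmax (ps : List (Int × Int)) (bc : Int) (p : Int × Int) (hp : p ∈ ps) :
    p.2 ≤ pvFmax ps bc := by
  induction ps generalizing bc with
  | nil => simp at hp
  | cons q ps ih =>
    rw [pvFmax_cons]
    rcases List.mem_cons.1 hp with h | h
    · subst h; exact le_trans (le_max_right _ _) (le_pvFmax _ _)
    · exact ih _ h

lemma pvFmax_attained (ps : List (Int × Int)) (bc : Int) :
    pvFmax ps bc = bc ∨ ∃ p ∈ ps, pvFmax ps bc = p.2 := by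
  induction ps generalizing bc with
  | nil => left; rfl
  | cons q ps ih =>
    rw [pvFmax_cons]
    rcases ih (max bc q.2) with h | ⟨p, hp, h⟩
    · rcases max_cases bc q.2 with ⟨he, _⟩ | ⟨he, _⟩
      · left; rw [h, he]
      · right; exact ⟨q, List.mem_cons_self, by rw [h, he]⟩
    · right; exact ⟨p, List.mem_cons_of_mem _ hp, h⟩

-- full characterisation of B's scan: final best count, its first value, and the
-- number of pairs attaining it
lemma pvFold_char (ps : List (Int × Int)) (bc bv t : Int) :
    ps.foldl pvStep (bc, bv, t) =
      if pvFmax ps bc = bc then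
        (bc, bv, t + (ps.countP (fun p => p.2 == bc) : Int))
      else
        (pvFmax ps bc,
         ((ps.find? (fun p => p.2 == pvFmax ps bc)).getD (0, 0)).1,
         (ps.countP (fun p => p.2 == pvFmax ps bc) : Int)) := by
  induction ps generalizing bc bv t with
  | nil => simp [pvFmax]
  | cons p ps ih =>
    rw [List.foldl_cons, pvFmax_cons]
    by_cases h1 : bc < p.2
    · have hmax : max bc p.2 = p.2 := max_eq_right (le_of_lt h1)
      rw [hmax]
      have hstep : pvStep (bc, bv, t) p = (p.2, p.1, 1) := by simp [pvStep, h1]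
      rw [hstep, ih]
      by_cases h2 : pvFmax ps p.2 = p.2
      · rw [if_pos h2]
        have hne : pvFmax ps p.2 ≠ bc := by rw [h2]; omega
        rw [if_neg hne, h2]
        simp
        omega
      · rw [if_neg h2]
        have hlt : p.2 < pvFmax ps p.2 := lt_of_le_of_ne (le_pvFmax _ _) (Ne.symm h2)
        have hne : pvFmax ps p.2 ≠ bc := by omega
        rw [if_neg hne]
        have hpne : (p.2 == pvFmax ps p.2) = false := by simp; omega
        simp [hpne]
    · have hmax : max bc p.2 = bc := max_eq_left (by omega)
      rw [hmax]
      by_cases h2 : p.2 = bc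
      · have hstep : pvStep (bc, bv, t) p = (bc, bv, t + 1) := by simp [pvStep, h2]
        rw [hstep, ih]
        by_cases h3 : pvFmax ps bc = bc
        · rw [if_pos h3, if_pos h3]
          have hbe : (p.2 == bc) = true := by simp [h2]
          simp [hbe]
          omega
        · rw [if_neg h3, if_neg h3]
          have hlt : bc < pvFmax ps bc := lt_of_le_of_ne (le_pvFmax _ _) (Ne.symm h3)
          have hpne : (p.2 == pvFmax ps bc) = false := by simp; omega
          simp [hpne]
      · have hstep : pvStep (bc, bv, t) p = (bc, bv, t) := by simp [pvStep, h1, h2]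
        rw [hstep, ih]
        by_cases h3 : pvFmax ps bc = bc
        · rw [if_pos h3, if_pos h3]
          have hpne : (p.2 == bc) = false := by simp [h2]
          simp [hpne]
        · rw [if_neg h3, if_neg h3]
          have hlt : bc < pvFmax ps bc := lt_of_le_of_ne (le_pvFmax _ _) (Ne.symm h3)
          have hpne : (p.2 == pvFmax ps bc) = false := by simp; omega
          simp [hpne]

-- a list with countP q = 1 has a unique member satisfying q
lemma pvUnique_of_countP_one (l : List Int) (q : Int → Bool)
    (h1 : l.countP q = 1) (a b : Int) (ha : a ∈ l) (hqa : q a) (hb : b ∈ l) (hqb : q b) :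
    a = b := by
  have hfa : a ∈ l.filter q := List.mem_filter.2 ⟨ha, hqa⟩
  have hfb : b ∈ l.filter q := List.mem_filter.2 ⟨hb, hqb⟩
  have hlen : (l.filter q).length = 1 := by
    have := h1; rw [List.countP_eq_length_filter] at this; exact this
  obtain ⟨c, hc⟩ := List.length_eq_one_iff.1 hlen
  rw [hc] at hfa hfb
  simp at hfa hfb; omega

lemma pvMain (array : List Int) : solution array = solution_alt array := by
  by_cases hne : array = []
  · subst hne; decide
  · simp only [solution, solution_alt]
    -- A's first loop builds the list of counts
    simp only [PySem.List.foldl_append_singleton_eq_map (fun i => ((array.count i : Int))) array [], List.nil_append]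
    -- B's first loop builds Counter(array); its items are the distinct values with their counts
    rw [PySem.Dict.foldl_insert_getD_add_one_eq_counter array, PySem.Dict.items_counter array]
    set D : List Int := PySem.Set.ofList array with hD
    set ps : List (Int × Int) := D.map (fun k => (k, ((array.count k : Int)))) with hps
    -- the max of the counts exists (array ≠ [])
    obtain ⟨m0, hm0⟩ : ∃ m0, PySem.List.max? (array.map fun i => ((array.count i : Int))) (fun y => y) = some m0 := by
      cases h : PySem.List.max? (array.map fun i => ((array.count i : Int))) (fun y => y) with
      | none => rw [PySem.List.max?_eq_none_iff] at h; simp at h; exact absurd h hne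
      | some x => exact ⟨x, rfl⟩
    simp only [hm0, Option.getD_some]
    have hub : ∀ x ∈ array, ((array.count x : Int)) ≤ m0 := by
      intro x hx
      exact PySem.List.max?_isMax hm0 _ (List.mem_map_of_mem hx)
    obtain ⟨xm, hxm, hxmc⟩ : ∃ x ∈ array, ((array.count x : Int)) = m0 := by
      have := PySem.List.max?_mem hm0
      simpa using this
    -- B's scan, characterised by pvFold_char
    have hstep_eq : (fun (st : Int × Int × Int) (p : Int × Int) =>
        if st.1 < p.2 then (p.2, p.1, 1)
        else if p.2 == st.1 then (st.1, st.2.1, st.2.2 + 1)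
        else st) = pvStep := rfl
    simp only [hstep_eq, pvFold_char]
    -- the running max over the distinct counts equals m0, and is positive
    have hmemD : ∀ x, x ∈ D ↔ x ∈ array := fun x => by rw [hD]; exact PySem.Set.mem_ofList array x
    obtain ⟨a0, ha0⟩ := List.exists_mem_of_ne_nil array hne
    have h1le : 1 ≤ pvFmax ps 0 := by
      have hmem : ((a0, ((array.count a0 : Int))) : Int × Int) ∈ ps := by
        rw [hps]; exact List.mem_map_of_mem ((hmemD a0).2 ha0)
      have := snd_le_pvFmax ps 0 _ hmem
      have hcp : 0 < array.count a0 := List.count_pos_iff.2 ha0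
      simp at this
      omega
    have hMm : pvFmax ps 0 = m0 := by
      apply le_antisymm
      · rcases pvFmax_attained ps 0 with h | ⟨p, hp, h⟩
        · omega
        · rw [hps] at hp
          obtain ⟨k, hk, hkp⟩ := List.mem_map.1 hp
          rw [h, ← hkp]
          exact hub k ((hmemD k).1 hk)
      · calc m0 = ((array.count xm : Int)) := hxmc.symm
          _ ≤ pvFmax ps 0 := snd_le_pvFmax ps 0 _ (by rw [hps]; exact List.mem_map_of_mem ((hmemD xm).2 hxm))
    have hMne : ¬ (m0 = 0) := by omega
    simp only [hMm, if_neg hMne]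
    -- A's second loop is a filter
    have hres : array.foldl (fun acc j => if ((array.count j : Int) == m0) then acc ++ [j] else acc) [] =
        array.filter (fun j => ((array.count j : Int) == m0)) := by
      simpa using PySem.List.foldl_append_if (fun j => ((array.count j : Int) == m0)) id array []
    simp only [hres]
    set q : Int → Bool := fun j => ((array.count j : Int) == m0) with hq
    set R : List Int := array.filter q with hR
    -- the number of distinct max-count values agrees on both sides
    have hcountps : ps.countP (fun p => p.2 == m0) = D.countP q := by
      rw [hps, List.countP_map]; rfl
    have hlenR : (PySem.Set.ofList R).length = D.countP q := by
      have hperm : (PySem.Set.ofList R).Perm (D.filter q) := by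
        refine (List.perm_ext_iff_of_nodup (PySem.Set.nodup_ofList R) ((PySem.Set.nodup_ofList array).filter q)).2 ?_
        intro x
        rw [PySem.Set.mem_ofList, hR, List.mem_filter, List.mem_filter, hmemD]
      rw [hperm.length_eq, List.countP_eq_length_filter]
    by_cases hc : D.countP q = 1
    · -- unique mode: both sides return it
      have hgA : (((PySem.Set.ofList R).length == 1) : Bool) = true := by
        simp [hlenR, hc]
      have hgB : ((((ps.countP (fun p => p.2 == m0) : Int)) == 1) : Bool) = true := by
        simp [hcountps, hc]
      rw [if_pos (by simpa using hgA), if_pos (by simpa using hgB)]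
      obtain ⟨k, hkD, hqk⟩ := List.countP_pos_iff.1 (by omega : 0 < D.countP q)
      have hkR : k ∈ R := by rw [hR]; exact List.mem_filter.2 ⟨(hmemD k).1 hkD, hqk⟩
      have hRne : R ≠ [] := List.ne_nil_of_mem hkR
      rw [PySem.List.pyGetD_zero]
      cases hRc : R with
      | nil => exact absurd hRc hRne
      | cons r rs =>
        have hrR : r ∈ R := by rw [hRc]; exact List.mem_cons_self
        have hrmem := List.mem_filter.1 (hR ▸ hrR)
        cases hfind : ps.find? (fun p => p.2 == m0) with
        | none =>
          exfalso
          have := List.find?_eq_none.1 hfind ((k, ((array.count k : Int)))) (by rw [hps]; exact List.mem_map_of_mem hkD)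
          exact this hqk
        | some w =>
          have hwp := List.find?_some hfind
          have hwmem := List.mem_of_find?_eq_some hfind
          rw [hps] at hwmem
          obtain ⟨k', hk', hk'w⟩ := List.mem_map.1 hwmem
          have hqk' : q k' = true := by rw [hq]; rw [← hk'w] at hwp; simpa using hwp
          have hrD : r ∈ D := (hmemD r).2 hrmem.1
          have hrk : r = k' := pvUnique_of_countP_one D q hc r k' hrD hrmem.2 hk' hqk'
          simp only [Option.getD_some]
          rw [← hk'w]
          simpa using hrk
    · -- no unique mode: both sides return -1
      have hgA : (((PySem.Set.ofList R).length == 1) : Bool) = false := by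
        simp [hlenR, hc]
      have hgB : ((((ps.countP (fun p => p.2 == m0) : Int)) == 1) : Bool) = false := by
        simp [hcountps]; omega
      rw [if_neg (by simp [hgA]), if_neg (by simp at hgB ⊢; omega)]

-- ===== VERDICT (by name: the statement is the Claim_ definition above) =====
theorem solution_spec : Claim_equal_solution := by
  intro array _
  unfold Spec_solution
  exact pvMain array
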